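-- pv_equiv track=rewrite | github.com/thepratholic/Competitive-Programming | LeetCode/Biweekly Contest 182/Score Validator.py | scoreValidator
-- ===== SOURCE A (Python) =====
-- def scoreValidator(events: list[str]) -> list[int]:
--     score = 0
--     cnt = 0
--
--     for ch in events:
--         if ch in ('0', '1', '2', '3', '4', '6'):
--             score += int(ch)
--
--         elif ch == 'W':
--             cnt += 1
--
--         elif ch == 'WD':
--             score += 1
--
--         elif ch == 'NB':
--             score += 1
--
--
--         if cnt == 10:
--             break
--
--     return [score, cnt]
-- ===== SOURCE B (Python) =====
-- _RUNS = {'0': 0, '1': 1, '2': 2, '3': 3, '4': 4, '6': 6, 'WD': 1, 'NB': 1}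
--
--
-- def scoreValidator(events: list[str]) -> list[int]:
--     # Locate the cutoff: just past the 10th 'W', or the whole list.
--     end = len(events)
--     wickets = 0
--     for i, ch in enumerate(events):
--         if ch == 'W':
--             wickets += 1
--             if wickets == 10:
--                 end = i + 1
--                 break
--     prefix = events[:end]
--     return [sum(_RUNS.get(c, 0) for c in prefix), prefix.count('W')]
-- ===== Notes on version B (the rewrite author's own statement) =====
-- stated objective: alternative
-- what changed: Replaces A's single accumulate-and-break pass (running score/wicket state with an in-loop break) by a locate-cutoff-then-tally decomposition: first find the index just past the 10th 'W' (or the list end), slice that prefix, then tally the score via a run-value dictionary and count the wickets with list.count.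
import Mathlib
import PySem

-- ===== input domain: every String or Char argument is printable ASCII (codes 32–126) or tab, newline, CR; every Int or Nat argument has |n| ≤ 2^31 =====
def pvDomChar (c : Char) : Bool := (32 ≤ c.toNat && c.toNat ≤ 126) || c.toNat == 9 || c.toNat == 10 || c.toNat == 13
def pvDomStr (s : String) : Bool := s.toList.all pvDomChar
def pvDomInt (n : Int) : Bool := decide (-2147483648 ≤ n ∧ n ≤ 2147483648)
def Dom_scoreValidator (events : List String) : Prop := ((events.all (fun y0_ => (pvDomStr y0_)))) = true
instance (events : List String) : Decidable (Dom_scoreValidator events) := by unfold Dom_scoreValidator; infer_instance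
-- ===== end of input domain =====

-- B replaces A's single accumulate-and-break pass by a locate-cutoff-then-tally
-- decomposition (find the index just past the 10th 'W', slice, then tally via a
-- run-value dictionary and list.count); objective: alternative structure, same cost.

-- ===== PORT A =====
-- the loop of A: running score / wicket count, early return when cnt reaches 10
def pvGoA : List String → Int → Int → List Int
  | [], score, cnt => [score, cnt]
  | ch :: rest, score, cnt =>
    let p :=
      if ch ∈ (["0", "1", "2", "3", "4", "6"] : List String) then
        -- int(ch): ch is one of the digit literals above, so int() cannot fail;
        -- (PySem.Int.ofStr? ch).getD 0 is exact on this branch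
        (score + (PySem.Int.ofStr? ch).getD 0, cnt)
      else if ch = "W" then (score, cnt + 1)
      else if ch = "WD" then (score + 1, cnt)
      else if ch = "NB" then (score + 1, cnt)
      else (score, cnt)
    if p.2 = 10 then [p.1, p.2] else pvGoA rest p.1 p.2

def scoreValidator (events : List String) : List Int :=
  pvGoA events 0 0

-- ===== PORT B =====
def pvRuns : PySem.Dict String Int :=
  PySem.Dict.ofList [("0", 0), ("1", 1), ("2", 2), ("3", 3), ("4", 4), ("6", 6), ("WD", 1), ("NB", 1)]

-- the cutoff loop of B: end = i+1 at the 10th 'W', else len(events)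
def pvFindEnd (n : Int) : List (Int × String) → Int → Int
  | [], _ => n
  | (i, ch) :: rest, w =>
    if ch = "W" then
      if w + 1 = 10 then i + 1 else pvFindEnd n rest (w + 1)
    else pvFindEnd n rest w

def scoreValidator_alt (events : List String) : List Int :=
  let e := pvFindEnd (events.length : Int) (PySem.List.enumerate events 0) 0
  let pre := PySem.List.slice events none (some e)
  [(pre.map (fun c => pvRuns.getD c 0)).sum, (pre.count "W" : Int)]

-- ===== PRECONDITION & SPEC =====
def Spec_scoreValidator (events : List String) (out : List Int) : Prop := out = scoreValidator_alt events
instance (events : List String) (out : List Int) : Decidable (Spec_scoreValidator events out) := by unfold Spec_scoreValidator; infer_instance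

-- ===== CLAIM (what is proved, stated in full; the proofs are below) =====
def Claim_equal_scoreValidator : Prop := ∀ (events : List String), Dom_scoreValidator events → Spec_scoreValidator events (scoreValidator events)

-- ===== LEMMAS AND PROOFS =====

-- proof-side recursive characterisation of the cutoff (length of the kept prefix)
def pvCut : List String → Int → Nat
  | [], _ => 0
  | ch :: rest, w =>
    if ch = "W" then
      if w + 1 = 10 then 1 else 1 + pvCut rest (w + 1)
    else 1 + pvCut rest w

lemma pvFindEnd_eq (l : List String) : ∀ (s w : Int),
    pvFindEnd (s + (l.length : Int)) (PySem.List.enumerate l s) w = s + (pvCut l w : Int) := by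
  induction l with
  | nil => intro s w; simp [pvFindEnd, pvCut, PySem.List.enumerate_nil]
  | cons ch rest ih =>
    intro s w
    rw [PySem.List.enumerate_cons]
    simp only [pvFindEnd, pvCut]
    have hc : s + (((ch :: rest).length : Nat) : Int) = (s + 1) + (rest.length : Int) := by
      push_cast [List.length_cons]; ring
    by_cases hW : ch = "W"
    · subst hW
      by_cases h10 : w + 1 = 10
      · simp [h10]
      · simp only [h10, if_true, if_false]
        rw [hc, ih (s + 1) (w + 1)]
        push_cast; ring
    · simp only [hW, if_false]
      rw [hc, ih (s + 1) w]
      push_cast; ring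

-- getD on the literal run dictionary, for a key that is none of its keys
lemma pvRuns_getD_other (ch : String) (h0 : ch ≠ "0") (h1 : ch ≠ "1") (h2 : ch ≠ "2")
    (h3 : ch ≠ "3") (h4 : ch ≠ "4") (h6 : ch ≠ "6") (hwd : ch ≠ "WD") (hnb : ch ≠ "NB") :
    pvRuns.getD ch 0 = 0 := by
  have hd : pvRuns = PySem.Dict.mk
      [("0", 0), ("1", 1), ("2", 2), ("3", 3), ("4", 4), ("6", 6), ("WD", 1), ("NB", 1)] := by decide
  rw [hd]
  simp [PySem.Dict.getD, PySem.Dict.get?, Ne.symm h0, Ne.symm h1, Ne.symm h2, Ne.symm h3,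
    Ne.symm h4, Ne.symm h6, Ne.symm hwd, Ne.symm hnb]

-- the heart of the equivalence: the break-loop equals score/count over the cut prefix
lemma pvGoA_eq (l : List String) : ∀ (score cnt : Int), cnt < 10 →
    pvGoA l score cnt =
      [score + ((l.take (pvCut l cnt)).map (fun c => pvRuns.getD c 0)).sum,
       cnt + ((l.take (pvCut l cnt)).count "W" : Int)] := by
  induction l with
  | nil => intro score cnt _; simp [pvGoA, pvCut]
  | cons ch rest ih =>
    intro score cnt hlt
    have htake : ∀ k : Nat, (ch :: rest).take (1 + k) = ch :: rest.take k := by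
      intro k; rw [Nat.add_comm]; exact List.take_succ_cons
    have hcne : ¬ cnt = 10 := by omega
    by_cases hW : ch = "W"
    · subst hW
      have hmem : ¬(("W" : String) ∈ (["0", "1", "2", "3", "4", "6"] : List String)) := by decide
      have hg : pvRuns.getD "W" 0 = 0 := by decide
      by_cases h10 : cnt + 1 = 10
      · have hc : pvCut ("W" :: rest) cnt = 1 := by simp [pvCut, h10]
        rw [hc]
        simp [pvGoA, hmem, h10, hg]
      · have hc : pvCut ("W" :: rest) cnt = 1 + pvCut rest (cnt + 1) := by
          simp [pvCut, h10]
        rw [hc, htake _]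
        simp only [pvGoA]
        simp [hmem, h10]
        rw [ih _ _ (by omega)]
        simp [hg]
        omega
    · by_cases hdig : ch ∈ (["0", "1", "2", "3", "4", "6"] : List String)
      · have hc : pvCut (ch :: rest) cnt = 1 + pvCut rest cnt := by simp [pvCut, hW]
        rw [hc, htake _]
        simp only [pvGoA]
        simp [hdig, hcne]
        rw [ih _ _ hlt]
        have hv : (PySem.Int.ofStr? ch).getD 0 = pvRuns.getD ch 0 := by
          fin_cases hdig <;> decide
        simp [hv, hW]
        omega
      · have hc : pvCut (ch :: rest) cnt = 1 + pvCut rest cnt := by simp [pvCut, hW]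
        rw [hc, htake _]
        by_cases hwd : ch = "WD"
        · subst hwd
          have hg : pvRuns.getD "WD" 0 = 1 := by decide
          simp only [pvGoA]
          simp [hdig, hcne]
          rw [ih _ _ hlt]
          simp [hg]
          omega
        · by_cases hnb : ch = "NB"
          · subst hnb
            have hg : pvRuns.getD "NB" 0 = 1 := by decide
            simp only [pvGoA]
            simp [hdig, hcne]
            rw [ih _ _ hlt]
            simp [hg]
            omega
          · have h0 : ch ≠ "0" := by intro h; exact hdig (by simp [h])
            have h1 : ch ≠ "1" := by intro h; exact hdig (by simp [h])
            have h2 : ch ≠ "2" := by intro h; exact hdig (by simp [h])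
            have h3 : ch ≠ "3" := by intro h; exact hdig (by simp [h])
            have h4 : ch ≠ "4" := by intro h; exact hdig (by simp [h])
            have h6 : ch ≠ "6" := by intro h; exact hdig (by simp [h])
            have hg := pvRuns_getD_other ch h0 h1 h2 h3 h4 h6 hwd hnb
            simp only [pvGoA]
            simp [hdig, hW, hwd, hnb, hcne]
            rw [ih _ _ hlt]
            simp [hg]

-- ===== VERDICT (by name: the statement is the Claim_ definition above) =====
theorem scoreValidator_spec : Claim_equal_scoreValidator := by
  intro events _
  unfold Spec_scoreValidator scoreValidator scoreValidator_alt
  have hE := pvFindEnd_eq events 0 0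
  rw [zero_add] at hE
  rw [pvGoA_eq events 0 0 (by norm_num)]
  simp only [hE, zero_add, PySem.List.slice_to _ (Int.natCast_nonneg _), Int.toNat_natCast]
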